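-- pv_equiv track=rewrite | github.com/apar-mistry/CS179m-CargoInc | backend/utils/balance.py | find_optimal_spot
-- ===== SOURCE A (Python) =====
-- def find_optimal_spot(weights, names, loading_point, container_weight=0):
--     num_rows = len(weights)
--     num_cols = len(weights[0]) if num_rows > 0 else 0
--
--     loading_row, loading_col = loading_point
--     loading_row -= 1  # Zero-based
--     loading_col -= 1  # Zero-based
--
--     min_distance = float('inf')
--     optimal_spot = None
--
--     for row in range(num_rows):
--         for col in range(num_cols):
--             # Check if the current spot is UNUSED
--             if names[row][col] == "UNUSED":
--                 # Determine if the spot has a valid support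
--                 if row == 0:
--                     # Ground level; always valid
--                     valid_support = True
--                 else:
--                     # Check the spot below
--                     below_weight = weights[row - 1][col]
--                     below_name = names[row - 1][col]
--                     if below_weight > 0 or below_name == "NAN":
--                         valid_support = True
--                     else:
--                         valid_support = False
--
--                 if valid_support:
--                     # Calculate Manhattan distance from loading point
--                     distance = abs(row - loading_row) + abs(col - loading_col)
--
--                     # Update the optimal spot if a closer spot is found
--                     if distance < min_distance:
--                         min_distance = distance
--                         optimal_spot = (row, col)
--                     elif distance == min_distance:
--                         # Tie-breaker: prioritize lower row, then lower column
--                         if optimal_spot is None or (row, col) < optimal_spot: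
--                             optimal_spot = (row, col)
--
--     if optimal_spot:
--         return optimal_spot, min_distance
--     else:
--         return (None, None)
-- ===== SOURCE B (Python) =====
-- def find_optimal_spot(weights, names, loading_point, container_weight=0):
--     num_rows = len(weights)
--     num_cols = len(weights[0]) if num_rows else 0
--     lr = loading_point[0] - 1
--     lc = loading_point[1] - 1
--     # collect every valid unused spot first (row-major, so ties are already
--     # ordered lowest-row-then-lowest-column)
--     cands = [(r, c)
--              for r in range(num_rows)
--              for c in range(num_cols)
--              if names[r][c] == "UNUSED"
--              and (r == 0 or weights[r - 1][c] > 0 or names[r - 1][c] == "NAN")]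
--     if not cands:
--         return (None, None)
--     d = min(abs(r - lr) + abs(c - lc) for r, c in cands)
--     for r, c in cands:
--         if abs(r - lr) + abs(c - lc) == d:
--             return (r, c), d
-- ===== Notes on version B (the rewrite author's own statement) =====
-- stated objective: simpler
-- what changed: Replaces the running-minimum state machine with its three tie-break branches by a collect-then-select decomposition: build the list of valid unused spots, take the minimum Manhattan distance, and return the first (row-major = lexicographically least) candidate at that distance.
import Mathlib
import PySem

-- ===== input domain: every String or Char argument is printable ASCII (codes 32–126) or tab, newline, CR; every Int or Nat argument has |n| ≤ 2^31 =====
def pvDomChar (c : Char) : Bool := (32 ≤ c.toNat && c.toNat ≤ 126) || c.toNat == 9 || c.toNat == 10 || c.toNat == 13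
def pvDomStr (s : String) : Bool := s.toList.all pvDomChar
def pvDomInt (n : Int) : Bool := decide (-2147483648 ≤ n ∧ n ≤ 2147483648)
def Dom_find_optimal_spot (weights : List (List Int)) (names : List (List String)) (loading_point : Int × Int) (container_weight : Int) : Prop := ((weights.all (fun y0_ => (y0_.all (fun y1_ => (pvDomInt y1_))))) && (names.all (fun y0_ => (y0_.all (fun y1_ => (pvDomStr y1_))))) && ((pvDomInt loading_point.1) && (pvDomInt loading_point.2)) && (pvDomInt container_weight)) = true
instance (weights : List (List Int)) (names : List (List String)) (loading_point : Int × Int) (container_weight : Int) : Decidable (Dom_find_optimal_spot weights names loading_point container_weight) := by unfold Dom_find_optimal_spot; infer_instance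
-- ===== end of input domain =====

-- B replaces A's running-minimum state machine (with its three tie-break branches) by a
-- collect-then-select decomposition: list the valid unused spots, take the minimal Manhattan
-- distance, return the first (row-major, hence lexicographically least) candidate at it.

-- ===== PORT A =====
-- grid accessors: m[r][c] with Python indexing (defaults are unreachable under Pre_)
def fosCell (names : List (List String)) (r c : Int) : String :=
  PySem.List.pyGetD (PySem.List.pyGetD names r []) c ""
def fosW (weights : List (List Int)) (r c : Int) : Int :=
  PySem.List.pyGetD (PySem.List.pyGetD weights r []) c 0
-- Python's tuple comparison (row, col) < optimal_spot (lexicographic)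
def fosLexLt (a b : Int × Int) : Bool := a.1 < b.1 || (a.1 == b.1 && a.2 < b.2)
-- Manhattan distance from the (zero-based) loading point
def fosD (lr lc : Int) (rc : Int × Int) : Int := |rc.1 - lr| + |rc.2 - lc|
-- A's update of (min_distance, optimal_spot) for a valid unused spot; none = float('inf')
def fosStep (lr lc : Int) (st : Option Int × Option (Int × Int)) (rc : Int × Int) :
    Option Int × Option (Int × Int) :=
  match st with
  | (none, _) => (some (fosD lr lc rc), some rc)
  | (some m, opt) =>
    let distance := fosD lr lc rc
    if distance < m then (some distance, some rc)
    else if distance = m then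
      match opt with
      | none => (some m, some rc)
      | some o => if fosLexLt rc o then (some m, some rc) else (some m, some o)
    else (some m, opt)

def find_optimal_spot (weights : List (List Int)) (names : List (List String)) (loading_point : Int × Int) (container_weight : Int) : (Option (Int × Int)) × Option Int :=
  let num_rows : Int := PySem.List.len weights
  let num_cols : Int := if num_rows > 0 then PySem.List.len (PySem.List.pyGetD weights 0 []) else 0
  let lr := loading_point.1 - 1
  let lc := loading_point.2 - 1
  let st := (PySem.List.pyRange 0 num_rows 1).foldl (fun st row =>
    (PySem.List.pyRange 0 num_cols 1).foldl (fun st col =>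
      if fosCell names row col = "UNUSED" then
        let valid_support : Bool :=
          if row = 0 then true
          else
            let below_weight := fosW weights (row - 1) col
            let below_name := fosCell names (row - 1) col
            decide (below_weight > 0) || decide (below_name = "NAN")
        if valid_support then fosStep lr lc st (row, col) else st
      else st) st) ((none : Option Int), (none : Option (Int × Int)))
  match st.2 with
  | some spot => (some spot, st.1)
  | none => (none, none)

-- ===== PORT B =====
-- B's candidate test: spot is UNUSED and supported
def fosP (weights : List (List Int)) (names : List (List String)) (rc : Int × Int) : Bool :=
  fosCell names rc.1 rc.2 == "UNUSED" &&
  (rc.1 == 0 || decide (fosW weights (rc.1 - 1) rc.2 > 0) || fosCell names (rc.1 - 1) rc.2 == "NAN")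

def find_optimal_spot_alt (weights : List (List Int)) (names : List (List String)) (loading_point : Int × Int) (container_weight : Int) : (Option (Int × Int)) × Option Int :=
  let num_rows : Int := PySem.List.len weights
  let num_cols : Int := if num_rows > 0 then PySem.List.len (PySem.List.pyGetD weights 0 []) else 0
  let lr := loading_point.1 - 1
  let lc := loading_point.2 - 1
  let cands : List (Int × Int) :=
    (PySem.List.pyRange 0 num_rows 1).flatMap (fun r =>
      ((PySem.List.pyRange 0 num_cols 1).filter (fun c => fosP weights names (r, c))).map
        (fun c => (r, c)))
  if cands = [] then (none, none)
  else
    let d := (PySem.List.min? (cands.map (fosD lr lc)) (fun x => x)).getD 0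
    match cands.find? (fun rc => fosD lr lc rc == d) with
    | some rc => (some rc, some d)
    | none => (none, none)  -- unreachable: d is the distance of some candidate

-- ===== PRECONDITION & SPEC =====
-- Pre_ excludes exactly the inputs on which Python A raises an IndexError: a grid with
-- columns but too few / too short rows of `names`, or an UNUSED spot above a too-short
-- `weights` row. (If there are no columns, nothing is indexed.)
def Pre_find_optimal_spot (weights : List (List Int)) (names : List (List String)) (loading_point : Int × Int) (container_weight : Int) : Prop :=
  (weights.headD []).length = 0 ∨
  (weights.length ≤ names.length ∧
   (∀ r < weights.length, (weights.headD []).length ≤ (names.getD r []).length) ∧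
   (∀ r < weights.length, ∀ c < (weights.headD []).length,
      0 < r → (names.getD r []).getD c "" = "UNUSED" → c < (weights.getD (r - 1) []).length))
instance (weights : List (List Int)) (names : List (List String)) (loading_point : Int × Int) (container_weight : Int) : Decidable (Pre_find_optimal_spot weights names loading_point container_weight) := by unfold Pre_find_optimal_spot; infer_instance

def pvWitness_find_optimal_spot : List (List Int) × List (List String) × (Int × Int) × Int :=
  ([[5, 0], [0, 0]], [["X", "UNUSED"], ["UNUSED", "UNUSED"]], (1, 2), 3)

def Spec_find_optimal_spot (weights : List (List Int)) (names : List (List String)) (loading_point : Int × Int) (container_weight : Int) (out : (Option (Int × Int)) × Option Int) : Prop := out = find_optimal_spot_alt weights names loading_point container_weight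
instance (weights : List (List Int)) (names : List (List String)) (loading_point : Int × Int) (container_weight : Int) (out : (Option (Int × Int)) × Option Int) : Decidable (Spec_find_optimal_spot weights names loading_point container_weight out) := by unfold Spec_find_optimal_spot; infer_instance

-- ===== CLAIM (what is proved, stated in full; the proofs are below) =====
def Claim_equal_find_optimal_spot : Prop := ∀ (weights : List (List Int)) (names : List (List String)) (loading_point : Int × Int) (container_weight : Int), Dom_find_optimal_spot weights names loading_point container_weight → Pre_find_optimal_spot weights names loading_point container_weight → Spec_find_optimal_spot weights names loading_point container_weight (find_optimal_spot weights names loading_point container_weight)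

-- ===== LEMMAS AND PROOFS =====

-- the row-major grid both ports walk
def fosGrid (R C : Int) : List (Int × Int) :=
  (PySem.List.pyRange 0 R 1).flatMap (fun r => (PySem.List.pyRange 0 C 1).map (fun c => (r, c)))

-- running first-argmin over the candidate list
def fam (lr lc : Int) (b : Int × Int) (t : List (Int × Int)) : Int × Int :=
  t.foldl (fun x y => if fosD lr lc y < fosD lr lc x then y else x) b

lemma foldl_nested_eq_flatMap {σ : Type} (rows cols : List Int) (g : σ → Int × Int → σ) (s : σ) :
    rows.foldl (fun st r => cols.foldl (fun st c => g st (r, c)) st) s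
      = (rows.flatMap (fun r => cols.map (fun c => (r, c)))).foldl g s := by
  induction rows generalizing s with
  | nil => rfl
  | cons r rs ih =>
    simp only [List.foldl_cons, List.flatMap_cons, List.foldl_append, List.foldl_map]
    exact ih _

lemma filter_flatMap_grid (weights : List (List Int)) (names : List (List String)) (R C : Int) :
    (PySem.List.pyRange 0 R 1).flatMap (fun r =>
        ((PySem.List.pyRange 0 C 1).filter (fun c => fosP weights names (r, c))).map
          (fun c => (r, c)))
      = (fosGrid R C).filter (fosP weights names) := by
  unfold fosGrid
  rw [List.filter_flatMap]
  simp only [List.filter_map]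
  rfl

lemma pairwise_grid (R C : Int) : (fosGrid R C).Pairwise (fun a b => fosLexLt a b = true) := by
  unfold fosGrid
  rw [List.pairwise_flatMap]
  constructor
  · intro r _
    rw [List.pairwise_map]
    refine (PySem.List.pairwise_lt_pyRange_one 0 C).imp ?_
    intro c c' h
    simp [fosLexLt, h]
  · refine (PySem.List.pairwise_lt_pyRange_one 0 R).imp ?_
    intro r r' h x hx y hy
    simp only [List.mem_map] at hx hy
    obtain ⟨c, _, rfl⟩ := hx
    obtain ⟨c', _, rfl⟩ := hy
    simp [fosLexLt, h]

lemma fosLexLt_asymm {a b : Int × Int} (h : fosLexLt a b = true) : fosLexLt b a = false := by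
  simp only [fosLexLt, Bool.or_eq_true, Bool.and_eq_true, beq_iff_eq, decide_eq_true_eq] at h ⊢
  simp only [Bool.or_eq_false_iff, Bool.and_eq_false_iff, decide_eq_false_iff_not, beq_eq_false_iff_ne]
  omega

lemma stepA_sorted (lr lc : Int) {b y : Int × Int} (h : fosLexLt b y = true) :
    fosStep lr lc (some (fosD lr lc b), some b) y
      = (if fosD lr lc y < fosD lr lc b
          then (some (fosD lr lc y), some y) else (some (fosD lr lc b), some b)) := by
  simp only [fosStep]
  rcases lt_trichotomy (fosD lr lc y) (fosD lr lc b) with h1 | h1 | h1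
  · simp [h1]
  · simp [h1, fosLexLt_asymm h]
  · have h2 : ¬ fosD lr lc y < fosD lr lc b := by omega
    have h3 : ¬ fosD lr lc y = fosD lr lc b := by omega
    simp [h2, h3]

lemma foldA (lr lc : Int) : ∀ (t : List (Int × Int)) (b : Int × Int),
    (∀ y ∈ t, fosLexLt b y = true) → t.Pairwise (fun a b => fosLexLt a b = true) →
    t.foldl (fosStep lr lc) (some (fosD lr lc b), some b)
      = (some (fosD lr lc (fam lr lc b t)), some (fam lr lc b t)) := by
  intro t
  induction t with
  | nil => intro b _ _; rfl
  | cons y t' ih =>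
    intro b hall hpw
    obtain ⟨hy, hpw'⟩ := List.pairwise_cons.mp hpw
    rw [List.foldl_cons, stepA_sorted lr lc (hall y (List.mem_cons_self ..))]
    by_cases h : fosD lr lc y < fosD lr lc b
    · rw [if_pos h]
      have hf : fam lr lc b (y :: t') = fam lr lc y t' := by simp [fam, h]
      rw [hf]
      exact ih y hy hpw'
    · rw [if_neg h]
      have hf : fam lr lc b (y :: t') = fam lr lc b t' := by simp [fam, h]
      rw [hf]
      exact ih b (fun z hz => hall z (List.mem_cons_of_mem _ hz)) hpw'

lemma fam_or (lr lc : Int) : ∀ (t : List (Int × Int)) (b : Int × Int),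
    fam lr lc b t = b ∨ fosD lr lc (fam lr lc b t) < fosD lr lc b := by
  intro t
  induction t with
  | nil => intro b; left; rfl
  | cons y t' ih =>
    intro b
    by_cases h : fosD lr lc y < fosD lr lc b
    · have hf : fam lr lc b (y :: t') = fam lr lc y t' := by simp [fam, h]
      rw [hf]
      rcases ih y with h' | h'
      · right; rw [h']; exact h
      · right; omega
    · have hf : fam lr lc b (y :: t') = fam lr lc b t' := by simp [fam, h]
      rw [hf]
      exact ih b

lemma fam_le (lr lc : Int) (t : List (Int × Int)) (b : Int × Int) :
    fosD lr lc (fam lr lc b t) ≤ fosD lr lc b := by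
  rcases fam_or lr lc t b with h | h
  · rw [h]
  · omega

lemma fam_dist (lr lc : Int) : ∀ (t : List (Int × Int)) (b : Int × Int),
    fosD lr lc (fam lr lc b t) = t.foldl (fun m y => min m (fosD lr lc y)) (fosD lr lc b) := by
  intro t
  induction t with
  | nil => intro b; rfl
  | cons y t' ih =>
    intro b
    rw [List.foldl_cons]
    by_cases h : fosD lr lc y < fosD lr lc b
    · have hf : fam lr lc b (y :: t') = fam lr lc y t' := by simp [fam, h]
      have hm : min (fosD lr lc b) (fosD lr lc y) = fosD lr lc y := by omega
      rw [hf, hm]; exact ih y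
    · have hf : fam lr lc b (y :: t') = fam lr lc b t' := by simp [fam, h]
      have hm : min (fosD lr lc b) (fosD lr lc y) = fosD lr lc b := by omega
      rw [hf, hm]; exact ih b

lemma fam_find (lr lc : Int) : ∀ (t : List (Int × Int)) (b : Int × Int),
    List.find? (fun rc => fosD lr lc rc == fosD lr lc (fam lr lc b t)) (b :: t)
      = some (fam lr lc b t) := by
  intro t
  induction t with
  | nil => intro b; simp [fam, List.find?]
  | cons y t' ih =>
    intro b
    by_cases h : fosD lr lc y < fosD lr lc b
    · -- the new seed is y
      have hf : fam lr lc b (y :: t') = fam lr lc y t' := by simp [fam, h]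
      have hb : ¬ fosD lr lc b = fosD lr lc (fam lr lc y t') := by
        have := fam_le lr lc t' y; omega
      rw [hf, List.find?_cons_of_neg (by simpa using hb)]
      exact ih y
    · -- the seed stays b
      have hf : fam lr lc b (y :: t') = fam lr lc b t' := by simp [fam, h]
      rw [hf]
      by_cases hb : fosD lr lc b = fosD lr lc (fam lr lc b t')
      · -- head matches; and then the running argmin never moved
        have hfb : fam lr lc b t' = b := by
          rcases fam_or lr lc t' b with h' | h'
          · exact h'
          · omega
        rw [hfb]
        exact List.find?_cons_of_pos (by simp)
      · have hlt : fosD lr lc (fam lr lc b t') < fosD lr lc b := by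
          have := fam_le lr lc t' b; omega
        have hy : ¬ fosD lr lc y = fosD lr lc (fam lr lc b t') := by omega
        rw [List.find?_cons_of_neg (by simpa using hb),
            List.find?_cons_of_neg (by simpa using hy)]
        have h2 := ih b
        rw [List.find?_cons_of_neg (by simpa using hb)] at h2
        exact h2

lemma fos_core (weights : List (List Int)) (names : List (List String)) (lr lc R C : Int) :
    (match ((PySem.List.pyRange 0 R 1).foldl (fun st row =>
        (PySem.List.pyRange 0 C 1).foldl (fun st col =>
          if fosCell names row col = "UNUSED" then
            let valid_support : Bool :=
              if row = 0 then true
              else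
                let below_weight := fosW weights (row - 1) col
                let below_name := fosCell names (row - 1) col
                decide (below_weight > 0) || decide (below_name = "NAN")
            if valid_support then fosStep lr lc st (row, col) else st
          else st) st) ((none : Option Int), (none : Option (Int × Int)))).2 with
     | some spot => (some spot, ((PySem.List.pyRange 0 R 1).foldl (fun st row =>
        (PySem.List.pyRange 0 C 1).foldl (fun st col =>
          if fosCell names row col = "UNUSED" then
            let valid_support : Bool :=
              if row = 0 then true
              else
                let below_weight := fosW weights (row - 1) col
                let below_name := fosCell names (row - 1) col
                decide (below_weight > 0) || decide (below_name = "NAN")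
            if valid_support then fosStep lr lc st (row, col) else st
          else st) st) ((none : Option Int), (none : Option (Int × Int)))).1)
     | none => ((none : Option (Int × Int)), (none : Option Int)))
    = (let cands : List (Int × Int) :=
        (PySem.List.pyRange 0 R 1).flatMap (fun r =>
          ((PySem.List.pyRange 0 C 1).filter (fun c => fosP weights names (r, c))).map
            (fun c => (r, c)))
       if cands = [] then (none, none)
       else
         let d := (PySem.List.min? (cands.map (fosD lr lc)) (fun x => x)).getD 0
         match cands.find? (fun rc => fosD lr lc rc == d) with
         | some rc => (some rc, some d)
         | none => (none, none)) := by
  have hbody : (fun (st : Option Int × Option (Int × Int)) (row : Int) =>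
      (PySem.List.pyRange 0 C 1).foldl (fun st col =>
        if fosCell names row col = "UNUSED" then
          let valid_support : Bool :=
            if row = 0 then true
            else
              let below_weight := fosW weights (row - 1) col
              let below_name := fosCell names (row - 1) col
              decide (below_weight > 0) || decide (below_name = "NAN")
          if valid_support then fosStep lr lc st (row, col) else st
        else st) st)
    = (fun st row => (PySem.List.pyRange 0 C 1).foldl
        (fun st col => if fosP weights names (row, col) then fosStep lr lc st (row, col) else st) st) := by
    funext st row
    congr 1
    funext st' col
    by_cases h1 : fosCell names row col = "UNUSED" <;>
      by_cases h2 : row = 0 <;>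
      by_cases h3 : fosW weights (row - 1) col > 0 <;>
      by_cases h4 : fosCell names (row - 1) col = "NAN" <;>
      simp [fosP, h1, h2, h3, h4]
  rw [hbody,
      foldl_nested_eq_flatMap (PySem.List.pyRange 0 R 1) (PySem.List.pyRange 0 C 1)
        (fun st rc => if fosP weights names rc then fosStep lr lc st rc else st),
      PySem.List.foldl_if_eq_foldl_filter (fosP weights names) (fosStep lr lc),
      filter_flatMap_grid,
      show List.flatMap (fun r => List.map (fun c => (r, c)) (PySem.List.pyRange 0 C 1))
          (PySem.List.pyRange 0 R 1) = fosGrid R C from rfl]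
  have hpw : ((fosGrid R C).filter (fosP weights names)).Pairwise (fun a b => fosLexLt a b = true) :=
    (pairwise_grid R C).filter _
  rcases hc : (fosGrid R C).filter (fosP weights names) with _ | ⟨x, t⟩
  · simp
  · rw [hc] at hpw
    obtain ⟨hall, hpw'⟩ := List.pairwise_cons.mp hpw
    have hseed : fosStep lr lc ((none : Option Int), (none : Option (Int × Int))) x
        = (some (fosD lr lc x), some x) := rfl
    rw [List.foldl_cons, hseed, foldA lr lc t x hall hpw']
    have hne : (x :: t : List (Int × Int)) ≠ [] := by simp
    simp only [hne, if_false, List.map_cons, PySem.List.min?_id_cons, Option.getD_some,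
      List.foldl_map]
    rw [← fam_dist lr lc t x, fam_find lr lc t x]

-- ===== VERDICT (by name: the statement is the Claim_ definition above) =====
theorem find_optimal_spot_spec : Claim_equal_find_optimal_spot := by
  intro weights names loading_point container_weight _ _
  show find_optimal_spot weights names loading_point container_weight
      = find_optimal_spot_alt weights names loading_point container_weight
  exact fos_core weights names (loading_point.1 - 1) (loading_point.2 - 1)
    (PySem.List.len weights)
    (if PySem.List.len weights > 0 then PySem.List.len (PySem.List.pyGetD weights 0 []) else 0)
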